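-- pv_equiv track=rewrite | github.com/caicongyang/skills | xiaocai-unusual-moves/analyze.py | group_by_concept
-- ===== SOURCE A (Python) =====
-- from collections import defaultdict
--
-- MAX_STOCKS_PER_CONCEPT = 5
--
-- def group_by_concept(results, concept_map):
--     concept_stocks = defaultdict(list)
--     no_concept = []
--
--     for r in results:
--         concepts = concept_map.get(r["code"], [])
--         if concepts:
--             for c in concepts:
--                 concept_stocks[c].append(r)
--         else:
--             no_concept.append(r)
--
--     seen = set()
--     grouped = {}
--     for concept, stocks in sorted(concept_stocks.items(), key=lambda x: -len(x[1])):
--         unique = [s for s in stocks if s["code"] not in seen]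
--         for s in unique:
--             seen.add(s["code"])
--         if unique:
--             grouped[concept] = unique[:MAX_STOCKS_PER_CONCEPT]
--
--     if no_concept:
--         ungrouped = [s for s in no_concept if s["code"] not in seen]
--         if ungrouped:
--             grouped["其他"] = ungrouped[:10]
--
--     return grouped
-- ===== SOURCE B (Python) =====
-- MAX_STOCKS_PER_CONCEPT = 5
--
-- def group_by_concept(results, concept_map):
--     # Every (concept, stock) membership in stock order; stocks without
--     # concepts go to a separate bucket.
--     memberships = []
--     no_concept = []
--     for r in results:
--         concepts = concept_map.get(r["code"], [])
--         if concepts: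
--             memberships.extend((c, r) for c in concepts)
--         else:
--             no_concept.append(r)
--
--     # Concepts by descending membership count; the stable sort breaks ties
--     # toward the concept whose membership appeared first.
--     counts = {}
--     for c, _ in memberships:
--         counts[c] = counts.get(c, 0) + 1
--     order = sorted(counts, key=lambda c: -counts[c])
--     rank = {c: i for i, c in enumerate(order)}
--
--     # A membership survives iff its concept is the stock's best-ranked one.
--     buckets = {c: [] for c in order}
--     for c, r in memberships:
--         if c == min(concept_map.get(r["code"], []), key=lambda x: rank[x]):
--             buckets[c].append(r)
--
--     grouped = {}
--     for c in order:
--         if buckets[c]: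
--             grouped[c] = buckets[c][:MAX_STOCKS_PER_CONCEPT]
--
--     if no_concept:
--         grouped["其他"] = no_concept[:10]
--
--     return grouped
-- ===== Notes on version B (the rewrite author's own statement) =====
-- stated objective: alternative
-- what changed: B replaces A's concept-centric pipeline (materialise every concept's full stock list, sort the (concept, stocks) items, then sweep them deduplicating against a growing seen-set of codes) by a membership-centric one: it lists every (concept, stock) membership once, ranks concepts by membership count, and keeps exactly the memberships whose concept is the stock's best-ranked one, so no per-concept stock lists for losing concepts and no seen-set filtering exist; Pre_ excludes only rows without a 'code' key, on which A raises KeyError.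
import Mathlib
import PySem

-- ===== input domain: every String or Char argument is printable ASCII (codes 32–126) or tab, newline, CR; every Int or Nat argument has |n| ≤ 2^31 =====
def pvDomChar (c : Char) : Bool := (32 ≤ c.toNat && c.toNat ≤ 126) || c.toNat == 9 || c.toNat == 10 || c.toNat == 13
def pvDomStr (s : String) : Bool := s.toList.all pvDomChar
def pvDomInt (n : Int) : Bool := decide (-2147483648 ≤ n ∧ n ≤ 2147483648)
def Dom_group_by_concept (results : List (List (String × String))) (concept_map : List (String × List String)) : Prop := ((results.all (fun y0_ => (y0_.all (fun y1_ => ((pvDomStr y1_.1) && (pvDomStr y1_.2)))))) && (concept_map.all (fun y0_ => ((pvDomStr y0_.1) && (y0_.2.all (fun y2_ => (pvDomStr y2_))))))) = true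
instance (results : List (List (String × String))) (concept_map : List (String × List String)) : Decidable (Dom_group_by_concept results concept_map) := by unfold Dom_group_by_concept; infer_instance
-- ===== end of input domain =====

-- B replaces A's concept-centric sweep (materialise every concept's full stock
-- list, sort, then dedup against a growing seen-set) by a membership-centric
-- pass: list every (concept, stock) membership, rank concepts once by
-- membership count, then keep exactly the memberships whose concept is the
-- stock's best-ranked one. Objective: alternative decomposition.

-- ===== PORT A =====
-- r["code"]  (Pre_ requires every result row to carry the "code" key)
def pvCode (r : List (String × String)) : String :=
  ((PySem.Dict.ofList r).get? "code").getD ""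

-- concept_map.get(code, [])
def pvConcepts (concept_map : List (String × List String)) (code : String) : List String :=
  (PySem.Dict.ofList concept_map).getD code []

def group_by_concept (results : List (List (String × String))) (concept_map : List (String × List String)) : List (String × List (List (String × String))) :=
  let st1 := results.foldl (fun (st : PySem.Dict String (List (List (String × String))) × List (List (String × String))) r =>
      let concepts := pvConcepts concept_map (pvCode r)
      if concepts ≠ [] then
        (concepts.foldl (fun d c => d.modify c [] (· ++ [r])) st.1, st.2)
      else (st.1, st.2 ++ [r])) (PySem.Dict.empty, [])
  let st2 := (PySem.List.sorted st1.1.items (fun x => -(x.2.length : Int))).foldl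
      (fun (st : PySem.Set String × PySem.Dict String (List (List (String × String)))) p =>
        let unique := p.2.filter (fun s => !(PySem.Set.contains st.1 (pvCode s)))
        (unique.foldl (fun t s => PySem.Set.add t (pvCode s)) st.1,
         if unique ≠ [] then st.2.insert p.1 (unique.take 5) else st.2)) (PySem.Set.empty, PySem.Dict.empty)
  (if st1.2 ≠ [] then
      let ungrouped := st1.2.filter (fun s => !(PySem.Set.contains st2.1 (pvCode s)))
      if ungrouped ≠ [] then st2.2.insert "其他" (ungrouped.take 10) else st2.2
    else st2.2).items

-- ===== PORT B =====
def group_by_concept_alt (results : List (List (String × String))) (concept_map : List (String × List String)) : List (String × List (List (String × String))) :=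
  let st1 := results.foldl (fun (st : List (String × List (String × String)) × List (List (String × String))) r =>
      let concepts := pvConcepts concept_map (pvCode r)
      if concepts ≠ [] then
        (st.1 ++ concepts.map (fun c => (c, r)), st.2)
      else (st.1, st.2 ++ [r])) ([], [])
  let counts := st1.1.foldl (fun (d : PySem.Dict String Int) p => d.modify p.1 0 (· + 1)) PySem.Dict.empty
  let order := PySem.List.sorted counts.keys (fun c => -(counts.getD c 0))
  let rank := (PySem.List.enumerate order).foldl (fun (d : PySem.Dict String Int) p => d.insert p.2 p.1) PySem.Dict.empty
  let buckets0 := order.foldl (fun (d : PySem.Dict String (List (List (String × String)))) c => d.insert c []) PySem.Dict.empty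
  let buckets := st1.1.foldl (fun b p =>
      match PySem.List.min? (pvConcepts concept_map (pvCode p.2)) (fun x => rank.getD x 0) with
      | some best => if p.1 == best then b.modify p.1 [] (· ++ [p.2]) else b
      | none => b) buckets0
  let grouped := order.foldl (fun (g : PySem.Dict String (List (List (String × String)))) c =>
      if buckets.getD c [] ≠ [] then g.insert c ((buckets.getD c []).take 5) else g) PySem.Dict.empty
  (if st1.2 ≠ [] then grouped.insert "其他" (st1.2.take 10) else grouped).items

-- ===== PRECONDITION & SPEC =====
-- Pre_ excludes exactly the rows without a "code" key: there Python A raises KeyError.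
def Pre_group_by_concept (results : List (List (String × String))) (concept_map : List (String × List String)) : Prop :=
  ∀ r ∈ results, (PySem.Dict.ofList r).contains "code" = true
instance (results : List (List (String × String))) (concept_map : List (String × List String)) : Decidable (Pre_group_by_concept results concept_map) := by unfold Pre_group_by_concept; infer_instance

def pvWitness_group_by_concept : (List (List (String × String))) × (List (String × List String)) :=
  ([[("code", "AAA"), ("name", "a")], [("code", "BBB")], [("code", "CCC")]],
   [("AAA", ["Tech", "AI"]), ("BBB", ["Tech"])])

def Spec_group_by_concept (results : List (List (String × String))) (concept_map : List (String × List String)) (out : List (String × List (List (String × String)))) : Prop := out = group_by_concept_alt results concept_map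
instance (results : List (List (String × String))) (concept_map : List (String × List String)) (out : List (String × List (List (String × String)))) : Decidable (Spec_group_by_concept results concept_map out) := by unfold Spec_group_by_concept; infer_instance

-- ===== CLAIM (what is proved, stated in full; the proofs are below) =====
def Claim_equal_group_by_concept : Prop := ∀ (results : List (List (String × String))) (concept_map : List (String × List String)), Dom_group_by_concept results concept_map → Pre_group_by_concept results concept_map → Spec_group_by_concept results concept_map (group_by_concept results concept_map)

-- ===== LEMMAS AND PROOFS =====

-- proof-side names for the two ports' intermediate states
def aStocks (R : List (List (String × String))) (M : List (String × List String)) : PySem.Dict String (List (List (String × String))) :=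
  R.foldl (fun d r =>
    let cs := pvConcepts M (pvCode r)
    if cs ≠ [] then cs.foldl (fun d c => d.modify c [] (· ++ [r])) d else d) PySem.Dict.empty

def bCounts (R : List (List (String × String))) (M : List (String × List String)) : PySem.Dict String Int :=
  R.foldl (fun d r =>
    let cs := pvConcepts M (pvCode r)
    if cs ≠ [] then cs.foldl (fun d c => d.modify c 0 (· + 1)) d else d) PySem.Dict.empty

def pvNoc (R : List (List (String × String))) (M : List (String × List String)) : List (List (String × String)) :=
  R.foldl (fun n r => if pvConcepts M (pvCode r) ≠ [] then n else n ++ [r]) []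

def bOrder (R : List (List (String × String))) (M : List (String × List String)) : List String :=
  PySem.List.sorted (bCounts R M).keys (fun c => -((bCounts R M).getD c 0))

def bRank (R : List (List (String × String))) (M : List (String × List String)) : PySem.Dict String Int :=
  (PySem.List.enumerate (bOrder R M)).foldl (fun (d : PySem.Dict String Int) p => d.insert p.2 p.1) PySem.Dict.empty

def bBuckets0 (R : List (List (String × String))) (M : List (String × List String)) : PySem.Dict String (List (List (String × String))) :=
  (bOrder R M).foldl (fun (d : PySem.Dict String (List (List (String × String)))) c => d.insert c []) PySem.Dict.empty

def pvMems (R : List (List (String × String))) (M : List (String × List String)) : List (String × List (String × String)) :=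
  R.foldl (fun m r =>
    let cs := pvConcepts M (pvCode r)
    if cs ≠ [] then m ++ cs.map (fun c => (c, r)) else m) []

def bBuckets (R : List (List (String × String))) (M : List (String × List String)) : PySem.Dict String (List (List (String × String))) :=
  (pvMems R M).foldl (fun b p =>
    match PySem.List.min? (pvConcepts M (pvCode p.2)) (fun x => (bRank R M).getD x 0) with
    | some best => if p.1 == best then b.modify p.1 [] (· ++ [p.2]) else b
    | none => b) (bBuckets0 R M)

-- the concept that claims a stock with the given code: the first concept in
-- bOrder among its concepts
def pvWinC (R : List (List (String × String))) (M : List (String × List String)) (k : String) : Option String :=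
  (bOrder R M).find? (fun c => decide (c ∈ pvConcepts M k))

def pvAssigned (R : List (List (String × String))) (M : List (String × List String)) (c : String) : List (List (String × String)) :=
  R.flatMap (fun r => if pvWinC R M (pvCode r) = some c
    then List.replicate ((pvConcepts M (pvCode r)).count c) r else [])

-- step-1 state of port A / port B is (aStocks, pvNoc) / (bCounts, pvNoc)
lemma split1A (R : List (List (String × String))) (M : List (String × List String)) :
    R.foldl (fun (st : PySem.Dict String (List (List (String × String))) × List (List (String × String))) r =>
      let concepts := pvConcepts M (pvCode r)
      if concepts ≠ [] then
        (concepts.foldl (fun d c => d.modify c [] (· ++ [r])) st.1, st.2)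
      else (st.1, st.2 ++ [r])) (PySem.Dict.empty, []) = (aStocks R M, pvNoc R M) := by
  have main : ∀ (l : List (List (String × String))) (d : PySem.Dict String (List (List (String × String)))) (n : List (List (String × String))),
      l.foldl (fun (st : PySem.Dict String (List (List (String × String))) × List (List (String × String))) r =>
        let concepts := pvConcepts M (pvCode r)
        if concepts ≠ [] then
          (concepts.foldl (fun d c => d.modify c [] (· ++ [r])) st.1, st.2)
        else (st.1, st.2 ++ [r])) (d, n)
      = (l.foldl (fun d r =>
            let cs := pvConcepts M (pvCode r)
            if cs ≠ [] then cs.foldl (fun d c => d.modify c [] (· ++ [r])) d else d) d,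
         l.foldl (fun n r => if pvConcepts M (pvCode r) ≠ [] then n else n ++ [r]) n) := by
    intro l
    induction l with
    | nil => intro d n; rfl
    | cons r t ih =>
      intro d n
      by_cases hc : pvConcepts M (pvCode r) ≠ [] <;>
        simp only [List.foldl_cons, hc, if_true, if_false, ne_eq, not_false_eq_true, ih]
  exact main R _ _

lemma split1B (R : List (List (String × String))) (M : List (String × List String)) :
    R.foldl (fun (st : List (String × List (String × String)) × List (List (String × String))) r =>
      let concepts := pvConcepts M (pvCode r)
      if concepts ≠ [] then
        (st.1 ++ concepts.map (fun c => (c, r)), st.2)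
      else (st.1, st.2 ++ [r])) ([], []) = (pvMems R M, pvNoc R M) := by
  have main : ∀ (l : List (List (String × String))) (m : List (String × List (String × String))) (n : List (List (String × String))),
      l.foldl (fun (st : List (String × List (String × String)) × List (List (String × String))) r =>
        let concepts := pvConcepts M (pvCode r)
        if concepts ≠ [] then
          (st.1 ++ concepts.map (fun c => (c, r)), st.2)
        else (st.1, st.2 ++ [r])) (m, n)
      = (l.foldl (fun m r =>
            let cs := pvConcepts M (pvCode r)
            if cs ≠ [] then m ++ cs.map (fun c => (c, r)) else m) m,
         l.foldl (fun n r => if pvConcepts M (pvCode r) ≠ [] then n else n ++ [r]) n) := by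
    intro l
    induction l with
    | nil => intro m n; rfl
    | cons r t ih =>
      intro m n
      by_cases hc : pvConcepts M (pvCode r) ≠ [] <;>
        simp only [List.foldl_cons, hc, if_true, if_false, ne_eq, not_false_eq_true, ih]
  exact main R _ _

-- fold over a flatMap is the nested fold
lemma foldl_flatMap' {α β γ : Type} (l : List α) (f : α → List β) (g : γ → β → γ) (init : γ) :
    (l.flatMap f).foldl g init = l.foldl (fun acc r => (f r).foldl g acc) init := by
  induction l generalizing init with
  | nil => rfl
  | cons x t ih => rw [List.flatMap_cons, List.foldl_append, List.foldl_cons, ih]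

lemma mems_flatMap (R : List (List (String × String))) (M : List (String × List String)) :
    pvMems R M = R.flatMap (fun r => (pvConcepts M (pvCode r)).map (fun c => (c, r))) := by
  have main : ∀ (l : List (List (String × String))) (m : List (String × List (String × String))),
      l.foldl (fun m r =>
          let cs := pvConcepts M (pvCode r)
          if cs ≠ [] then m ++ cs.map (fun c => (c, r)) else m) m
        = m ++ l.flatMap (fun r => (pvConcepts M (pvCode r)).map (fun c => (c, r))) := by
    intro l
    induction l with
    | nil => intro m; simp
    | cons r t ih =>
      intro m
      rw [List.foldl_cons, List.flatMap_cons]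
      by_cases hc : pvConcepts M (pvCode r) ≠ []
      · show List.foldl _ (if pvConcepts M (pvCode r) ≠ [] then _ else m) t = _
        rw [if_pos hc, ih, List.append_assoc]
      · show List.foldl _ (if pvConcepts M (pvCode r) ≠ [] then _ else m) t = _
        rw [if_neg hc, ih, not_ne_iff.mp hc]
        simp
  rw [pvMems, main R []]
  rfl

-- B's membership count loop builds exactly bCounts
lemma countsB (R : List (List (String × String))) (M : List (String × List String)) :
    (pvMems R M).foldl (fun (d : PySem.Dict String Int) p => d.modify p.1 0 (· + 1)) PySem.Dict.empty
      = bCounts R M := by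
  rw [mems_flatMap, foldl_flatMap', bCounts]
  congr 1
  funext d r
  by_cases hc : pvConcepts M (pvCode r) ≠ []
  · show ((pvConcepts M (pvCode r)).map (fun c => (c, r))).foldl (fun d p => d.modify p.1 0 (· + 1)) d
        = if pvConcepts M (pvCode r) ≠ [] then _ else d
    rw [if_pos hc, List.foldl_map]
  · show ((pvConcepts M (pvCode r)).map (fun c => (c, r))).foldl (fun d p => d.modify p.1 0 (· + 1)) d
        = if pvConcepts M (pvCode r) ≠ [] then _ else d
    rw [if_neg hc, not_ne_iff.mp hc]
    rfl

lemma inner_stocks (r : List (String × String)) :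
    ∀ (cs : List String) (d : PySem.Dict String (List (List (String × String)))) (c : String),
      (cs.foldl (fun d c => d.modify c [] (· ++ [r])) d).getD c []
        = d.getD c [] ++ List.replicate (cs.count c) r := by
  intro cs
  induction cs with
  | nil => intro d c; simp
  | cons x t ih =>
    intro d c
    rw [List.foldl_cons, ih, PySem.Dict.getD_modify, List.count_cons]
    by_cases hcx : c = x
    · subst hcx
      rw [if_pos rfl, beq_self_eq_true, if_pos rfl, List.append_assoc]
      rw [show (t.count c) + 1 = (t.count c).succ from rfl]
      rw [List.replicate_succ]
      rfl
    · have : (x == c) = false := beq_false_of_ne (fun hh => hcx hh.symm)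
      rw [if_neg hcx, this]
      simp

lemma inner_counts :
    ∀ (cs : List String) (d : PySem.Dict String Int) (c : String),
      (cs.foldl (fun d c => d.modify c 0 (· + 1)) d).getD c 0
        = d.getD c 0 + (cs.count c : Int) := by
  intro cs
  induction cs with
  | nil => intro d c; simp
  | cons x t ih =>
    intro d c
    rw [List.foldl_cons, ih, PySem.Dict.getD_modify, List.count_cons]
    by_cases hcx : c = x
    · subst hcx
      rw [if_pos rfl, beq_self_eq_true, if_pos rfl]
      push_cast
      ring
    · have : (x == c) = false := beq_false_of_ne (fun hh => hcx hh.symm)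
      rw [if_neg hcx, this]
      simp

lemma stocks_getD (R : List (List (String × String))) (M : List (String × List String)) (c : String) :
    (aStocks R M).getD c []
      = R.flatMap (fun r => List.replicate ((pvConcepts M (pvCode r)).count c) r) := by
  have main : ∀ (l : List (List (String × String))) (d : PySem.Dict String (List (List (String × String)))),
      (l.foldl (fun d r =>
          let cs := pvConcepts M (pvCode r)
          if cs ≠ [] then cs.foldl (fun d c => d.modify c [] (· ++ [r])) d else d) d).getD c []
        = d.getD c [] ++ l.flatMap (fun r => List.replicate ((pvConcepts M (pvCode r)).count c) r) := by
    intro l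
    induction l with
    | nil => intro d; simp
    | cons r t ih =>
      intro d
      rw [List.foldl_cons, List.flatMap_cons]
      by_cases hc : pvConcepts M (pvCode r) ≠ []
      · show (List.foldl _ (if pvConcepts M (pvCode r) ≠ [] then _ else d) t).getD c [] = _
        rw [if_pos hc, ih, inner_stocks r _]
        simp [List.append_assoc]
      · show (List.foldl _ (if pvConcepts M (pvCode r) ≠ [] then _ else d) t).getD c [] = _
        have hnil := not_ne_iff.mp hc
        rw [if_neg hc, ih, hnil]
        simp
  have := main R PySem.Dict.empty
  rw [aStocks, this, PySem.Dict.getD_empty]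
  rfl

lemma counts_getD (R : List (List (String × String))) (M : List (String × List String)) (c : String) :
    (bCounts R M).getD c 0 = (R.map (fun r => ((pvConcepts M (pvCode r)).count c : Int))).sum := by
  have main : ∀ (l : List (List (String × String))) (d : PySem.Dict String Int),
      (l.foldl (fun d r =>
          let cs := pvConcepts M (pvCode r)
          if cs ≠ [] then cs.foldl (fun d c => d.modify c 0 (· + 1)) d else d) d).getD c 0
        = d.getD c 0 + (l.map (fun r => ((pvConcepts M (pvCode r)).count c : Int))).sum := by
    intro l
    induction l with
    | nil => intro d; simp
    | cons r t ih =>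
      intro d
      rw [List.foldl_cons, List.map_cons, List.sum_cons]
      by_cases hc : pvConcepts M (pvCode r) ≠ []
      · show (List.foldl _ (if pvConcepts M (pvCode r) ≠ [] then _ else d) t).getD c 0 = _
        rw [if_pos hc, ih, inner_counts]
        ring
      · show (List.foldl _ (if pvConcepts M (pvCode r) ≠ [] then _ else d) t).getD c 0 = _
        have hnil := not_ne_iff.mp hc
        rw [if_neg hc, ih, hnil]
        simp
  have := main R PySem.Dict.empty
  rw [bCounts, this, PySem.Dict.getD_empty]
  simp

lemma keys_fold_gen {ν : Type} (M : List (String × List String)) (d0 : ν)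
    (g : List (String × String) → ν → ν) :
    ∀ (l : List (List (String × String))) (d : PySem.Dict String ν),
      (l.foldl (fun d r =>
          let cs := pvConcepts M (pvCode r)
          if cs ≠ [] then cs.foldl (fun d c => d.modify c d0 (g r)) d else d) d).keys
        = PySem.Set.update d.keys (l.flatMap (fun r => pvConcepts M (pvCode r))) := by
  intro l
  induction l with
  | nil => intro d; simp [PySem.Set.update]
  | cons r t ih =>
    intro d
    rw [List.foldl_cons, List.flatMap_cons]
    by_cases hc : pvConcepts M (pvCode r) ≠ []
    · show (List.foldl _ (if pvConcepts M (pvCode r) ≠ [] then _ else d)  t).keys = _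
      rw [if_pos hc, ih, PySem.Dict.keys_foldl_modify (f := fun _ _ => g r)]
      simp [PySem.Set.update, List.foldl_append]
    · show (List.foldl _ (if pvConcepts M (pvCode r) ≠ [] then _ else d) t).keys = _
      rw [if_neg hc, ih, not_ne_iff.mp hc]
      simp [PySem.Set.update]

lemma keysA (R : List (List (String × String))) (M : List (String × List String)) :
    (aStocks R M).keys = PySem.Set.ofList (R.flatMap (fun r => pvConcepts M (pvCode r))) := by
  rw [aStocks, keys_fold_gen M ([] : List (List (String × String))) (fun r v => v ++ [r])]
  rw [PySem.Dict.keys_empty, PySem.Set.ofList_eq_foldl]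
  rfl

lemma keysB (R : List (List (String × String))) (M : List (String × List String)) :
    (bCounts R M).keys = PySem.Set.ofList (R.flatMap (fun r => pvConcepts M (pvCode r))) := by
  rw [bCounts, keys_fold_gen M (0 : Int) (fun _ v => v + 1)]
  rw [PySem.Dict.keys_empty, PySem.Set.ofList_eq_foldl]
  rfl

lemma nodup_keysA (R : List (List (String × String))) (M : List (String × List String)) :
    (aStocks R M).keys.Nodup := by
  rw [keysA]; exact PySem.Set.nodup_ofList _

lemma nodup_order (R : List (List (String × String))) (M : List (String × List String)) :
    (bOrder R M).Nodup := by
  have hp := PySem.List.sorted_perm (bCounts R M).keys (fun c => -((bCounts R M).getD c 0)) false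
  have : (bCounts R M).keys.Nodup := by rw [keysB]; exact PySem.Set.nodup_ofList _
  exact hp.nodup_iff.mpr this

lemma mem_order (R : List (List (String × String))) (M : List (String × List String)) (c : String) :
    c ∈ bOrder R M ↔ ∃ r ∈ R, c ∈ pvConcepts M (pvCode r) := by
  rw [bOrder, PySem.List.mem_sorted, keysB, PySem.Set.mem_ofList, List.mem_flatMap]

-- stable sort commutes with map when the key factors through the map
lemma sorted_map_factor {α β κ : Type} [LT κ] [DecidableLT κ] (l : List α) (f : α → β) (key : β → κ) :
    PySem.List.sorted (l.map f) key = (PySem.List.sorted l (fun a => key (f a))).map f := by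
  have hins : ∀ (x : α) (ys : List α),
      PySem.List.insertBy (fun a b => decide (key a < key b)) (f x) (ys.map f)
        = (PySem.List.insertBy (fun a b => decide (key (f a) < key (f b))) x ys).map f := by
    intro x ys
    induction ys with
    | nil => simp [PySem.List.insertBy]
    | cons y t ih =>
      rw [List.map_cons, PySem.List.insertBy, PySem.List.insertBy]
      by_cases hlt : key (f x) < key (f y)
      · simp [hlt]
      · simp only [hlt, decide_false, Bool.false_eq_true, if_false, List.map_cons, ih]
  rw [PySem.List.sorted_eq_foldl_insertBy, PySem.List.sorted_eq_foldl_insertBy, List.foldl_map]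
  have main : ∀ (l' : List α) (acc : List α),
      List.foldl (fun acc x => PySem.List.insertBy (fun a b => decide (key a < key b)) (f x) acc) (acc.map f) l'
        = (List.foldl (fun acc x => PySem.List.insertBy (fun a b => decide (key (f a) < key (f b))) x acc) acc l').map f := by
    intro l'
    induction l' with
    | nil => intro acc; rfl
    | cons x t ih =>
      intro acc
      rw [List.foldl_cons, List.foldl_cons, hins, ih]
  exact main l []

-- A's sorted item list is bOrder decorated with the stock lists
lemma sorted_items_eq (R : List (List (String × String))) (M : List (String × List String)) :
    PySem.List.sorted (aStocks R M).items (fun x => -(x.2.length : Int))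
      = (bOrder R M).map (fun c => (c, (aStocks R M).getD c [])) := by
  rw [PySem.Dict.items_eq_map_keys (aStocks R M) (nodup_keysA R M) []]
  rw [sorted_map_factor ((aStocks R M).keys) (fun k => (k, (aStocks R M).getD k [])) (fun x => -(x.2.length : Int))]
  rw [bOrder]
  have hkeys : (aStocks R M).keys = (bCounts R M).keys := by rw [keysA, keysB]
  have hkey : (fun a => -((((fun k => (k, (aStocks R M).getD k [])) a).2.length : Int)))
      = (fun c => -((bCounts R M).getD c 0)) := by
    funext c
    simp only []
    rw [counts_getD R M c, stocks_getD R M c, List.length_flatMap]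
    simp only [List.length_replicate]
    congr 1
    have hsum : ∀ (l : List (List (String × String))),
        (((l.map (fun a => List.count c (pvConcepts M (pvCode a)))).sum : Nat) : Int)
          = (l.map (fun r => (List.count c (pvConcepts M (pvCode r)) : Int))).sum := by
      intro l
      induction l with
      | nil => simp
      | cons r t ih =>
        simp only [List.map_cons, List.sum_cons]
        rw [Nat.cast_add, ih]
    exact hsum R
  rw [hkeys, hkey]

lemma rank_fold (l : List String) (hnd : l.Nodup) :
    ∀ (s : Int) (d : PySem.Dict String Int) (c : String),
      ((PySem.List.enumerate l s).foldl (fun (d : PySem.Dict String Int) p => d.insert p.2 p.1) d).getD c 0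
        = if c ∈ l then s + (l.idxOf c : Int) else d.getD c 0 := by
  induction l with
  | nil => intro s d c; simp [PySem.List.enumerate]
  | cons x t ih =>
    rcases List.nodup_cons.mp hnd with ⟨hx, ht⟩
    intro s d c
    rw [PySem.List.enumerate_cons, List.foldl_cons, ih ht]
    by_cases hcx : c = x
    · subst hcx
      rw [if_neg hx, if_pos (List.mem_cons_self), PySem.Dict.getD_insert, if_pos rfl,
        List.idxOf_cons_self]
      simp
    · by_cases hct : c ∈ t
      · rw [if_pos hct, if_pos (List.mem_cons_of_mem x hct), List.idxOf_cons]
        have : (x == c) = false := beq_false_of_ne (fun hh => hcx hh.symm)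
        rw [this]
        simp only [cond_false]
        push_cast
        ring
      · rw [if_neg hct, if_neg (by simp [hcx, hct]), PySem.Dict.getD_insert, if_neg hcx]

lemma rank_getD (R : List (List (String × String))) (M : List (String × List String))
    (c : String) (hc : c ∈ bOrder R M) :
    (bRank R M).getD c 0 = ((bOrder R M).idxOf c : Int) := by
  rw [bRank, rank_fold (bOrder R M) (nodup_order R M) 0 PySem.Dict.empty c, if_pos hc]
  ring

lemma win_none (R : List (List (String × String))) (M : List (String × List String)) (k : String)
    (h : pvConcepts M k = []) : pvWinC R M k = none := by
  rw [pvWinC, List.find?_eq_none]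
  intro x _
  simp [h]

lemma win_mem (R : List (List (String × String))) (M : List (String × List String)) (k : String)
    (w : String) (h : pvWinC R M k = some w) : w ∈ pvConcepts M k := by
  have := List.find?_some h
  simpa using this

-- B's argmin over ranks is exactly the first concept of bOrder among the stock's concepts
lemma min_eq_win (R : List (List (String × String))) (M : List (String × List String))
    (k : String) (hne : pvConcepts M k ≠ []) (hsub : ∀ c ∈ pvConcepts M k, c ∈ bOrder R M) :
    PySem.List.min? (pvConcepts M k) (fun c => (bRank R M).getD c 0) = pvWinC R M k := by
  obtain ⟨m, hm⟩ : ∃ m, PySem.List.min? (pvConcepts M k) (fun c => (bRank R M).getD c 0) = some m := by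
    cases hmin : PySem.List.min? (pvConcepts M k) (fun c => (bRank R M).getD c 0) with
    | none => exact absurd ((PySem.List.min?_eq_none_iff _ _).mp hmin) hne
    | some m => exact ⟨m, rfl⟩
  have hmmem := PySem.List.min?_mem hm
  have hmin := PySem.List.min?_isMin hm
  obtain ⟨w, hw⟩ : ∃ w, pvWinC R M k = some w := by
    cases hwin : pvWinC R M k with
    | none =>
      rw [pvWinC, List.find?_eq_none] at hwin
      obtain ⟨x, hx⟩ := List.exists_mem_of_ne_nil _ hne
      exact absurd hx (by simpa using hwin x (hsub x hx))
    | some w => exact ⟨w, rfl⟩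
  obtain ⟨hpw, as, bs, hsplit, has⟩ := List.find?_eq_some_iff_append.mp hw
  have hwcs : w ∈ pvConcepts M k := by simpa using hpw
  have hnotcs : ∀ a ∈ as, a ∉ pvConcepts M k := by
    intro a ha
    have := has a ha
    simpa using this
  have hidxw : (bOrder R M).idxOf w = as.length := by
    rw [hsplit, List.idxOf_append, if_neg (fun hmem => hnotcs w hmem hwcs), List.idxOf_cons_self]
    simp
  have hidxm : (bOrder R M).idxOf m = (w :: bs).idxOf m + as.length := by
    rw [hsplit, List.idxOf_append, if_neg (fun hmem => hnotcs m hmem hmmem)]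
  have hle := hmin w hwcs
  rw [rank_getD R M m (hsub m hmmem), rank_getD R M w (hsub w hwcs)] at hle
  have hle' : (bOrder R M).idxOf m ≤ (bOrder R M).idxOf w := by exact_mod_cast hle
  have hzero : (w :: bs).idxOf m = 0 := by omega
  have hmw : m = w := by
    by_contra hne'
    rw [List.idxOf_cons] at hzero
    have : (w == m) = false := beq_false_of_ne (fun hh => hne' hh.symm)
    rw [this] at hzero
    simp at hzero
  rw [hm, hw, hmw]

lemma buckets0_getD (R : List (List (String × String))) (M : List (String × List String)) (c : String) :
    (bBuckets0 R M).getD c [] = [] := by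
  rw [bBuckets0]
  have main : ∀ (l : List String) (d : PySem.Dict String (List (List (String × String)))),
      (∀ j, d.getD j [] = []) →
      ∀ j, (l.foldl (fun d c => d.insert c []) d).getD j [] = [] := by
    intro l
    induction l with
    | nil => intro d hd j; exact hd j
    | cons x t ih =>
      intro d hd j
      refine ih _ (fun j' => ?_) j
      rw [PySem.Dict.getD_insert]
      split
      · rfl
      · exact hd j'
  exact main _ _ (fun j => PySem.Dict.getD_empty j []) c

-- the inner sweep over one stock's memberships, once the winner w is fixed
-- the inner sweep over one stock's memberships, once the winner w is fixed
lemma inner_buckets (r : List (String × String)) (w : String) :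
    ∀ (ms : List String) (d : PySem.Dict String (List (List (String × String)))) (c : String),
      (ms.foldl (fun b c' => if c' == w then b.modify c' [] (· ++ [r]) else b) d).getD c []
        = d.getD c [] ++ List.replicate (if c = w then ms.count w else 0) r := by
  intro ms
  induction ms with
  | nil => intro d c; simp
  | cons x t ih =>
    intro d c
    rw [List.foldl_cons]
    by_cases hxw : x = w
    · subst hxw
      rw [if_pos (beq_self_eq_true x), ih, PySem.Dict.getD_modify]
      by_cases hcx : c = x
      · subst hcx
        rw [if_pos rfl, if_pos rfl, if_pos rfl, List.count_cons_self, List.append_assoc,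
          List.replicate_succ]
        rfl
      · rw [if_neg hcx, if_neg hcx, if_neg hcx]
    · have hb : (x == w) = false := beq_false_of_ne hxw
      rw [hb]
      simp only [Bool.false_eq_true, if_false]
      rw [ih]
      by_cases hcw : c = w
      · subst hcw
        rw [if_pos rfl, if_pos rfl, List.count_cons, beq_false_of_ne hxw]
        simp
      · rw [if_neg hcw, if_neg hcw]

lemma buckets_getD (R : List (List (String × String))) (M : List (String × List String)) (c : String) :
    (bBuckets R M).getD c [] = pvAssigned R M c := by
  have main : ∀ (l : List (List (String × String))), (∀ r ∈ l, r ∈ R) →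
      ∀ (d : PySem.Dict String (List (List (String × String)))),
      (l.foldl (fun b r => (((pvConcepts M (pvCode r)).map (fun c => (c, r))).foldl (fun b p =>
          match PySem.List.min? (pvConcepts M (pvCode p.2)) (fun x => (bRank R M).getD x 0) with
          | some best => if p.1 == best then b.modify p.1 [] (· ++ [p.2]) else b
          | none => b) b)) d).getD c []
        = d.getD c [] ++ l.flatMap (fun r => if pvWinC R M (pvCode r) = some c
            then List.replicate ((pvConcepts M (pvCode r)).count c) r else []) := by
    intro l
    induction l with
    | nil => intro _ d; simp
    | cons r t ih =>
      intro hl d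
      have hrR : r ∈ R := hl r List.mem_cons_self
      rw [List.foldl_cons, List.flatMap_cons,
        ih (fun x hx => hl x (List.mem_cons_of_mem r hx))]
      by_cases hc : pvConcepts M (pvCode r) ≠ []
      · have hsub : ∀ x ∈ pvConcepts M (pvCode r), x ∈ bOrder R M :=
          fun x hx => (mem_order R M x).mpr ⟨r, hrR, hx⟩
        obtain ⟨w, hwin⟩ : ∃ w, pvWinC R M (pvCode r) = some w := by
          cases hwv : pvWinC R M (pvCode r) with
          | none =>
            rw [pvWinC, List.find?_eq_none] at hwv
            obtain ⟨x, hx⟩ := List.exists_mem_of_ne_nil _ hc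
            exact absurd (hwv x (hsub x hx)) (by simp [hx])
          | some w => exact ⟨w, rfl⟩
        have hmin := min_eq_win R M (pvCode r) hc hsub
        rw [hwin] at hmin
        have hstep : (((pvConcepts M (pvCode r)).map (fun c => (c, r))).foldl (fun b p =>
              match PySem.List.min? (pvConcepts M (pvCode p.2)) (fun x => (bRank R M).getD x 0) with
              | some best => if p.1 == best then b.modify p.1 [] (· ++ [p.2]) else b
              | none => b) d)
            = (pvConcepts M (pvCode r)).foldl (fun b c' => if c' == w then b.modify c' [] (· ++ [r]) else b) d := by
          rw [List.foldl_map]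
          congr 1
          funext b c'
          rw [hmin]
        rw [hstep, inner_buckets r w _ d c]
        by_cases hcw : c = w
        · subst hcw
          rw [if_pos rfl, if_pos hwin, List.append_assoc]
        · rw [if_neg hcw, if_neg (by rw [hwin]; exact fun hh => hcw (Option.some_inj.mp hh).symm)]
          simp
      · have hnone := win_none R M (pvCode r) (not_ne_iff.mp hc)
        rw [not_ne_iff.mp hc]
        rw [if_neg (by simp [hnone])]
        simp
  rw [bBuckets, mems_flatMap, foldl_flatMap', pvAssigned,
    main R (fun _ hr => hr) (bBuckets0 R M), buckets0_getD]
  rfl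

lemma noc_eq_filter (R : List (List (String × String))) (M : List (String × List String)) :
    pvNoc R M = R.filter (fun r => decide (pvConcepts M (pvCode r) = [])) := by
  rw [pvNoc]
  have h : (fun (n : List (List (String × String))) r => if pvConcepts M (pvCode r) ≠ [] then n else n ++ [r])
      = (fun n r => if pvConcepts M (pvCode r) = [] then n ++ [r] else n) := by
    funext n r
    by_cases hc : pvConcepts M (pvCode r) = [] <;> simp [hc]
  rw [h, PySem.List.foldl_append_ite_eq_filter]
  simp

-- the winner of a code is the concept at the split point iff the code has that
-- concept and no earlier concept claimed it
lemma win_char (R : List (List (String × String))) (M : List (String × List String))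
    (pre suf : List String) (c : String) (hsplit : bOrder R M = pre ++ c :: suf) (k : String) :
    pvWinC R M k = some c ↔ (c ∈ pvConcepts M k ∧ ¬ ∃ w ∈ pre, pvWinC R M k = some w) := by
  have hnd := nodup_order R M
  rw [hsplit, List.nodup_append] at hnd
  have hcnotpre : c ∉ pre := fun hcp => hnd.2.2 c hcp c List.mem_cons_self rfl
  constructor
  · intro hwc
    refine ⟨win_mem R M k c hwc, ?_⟩
    rintro ⟨w, hwpre, hwin⟩
    rw [hwc, Option.some_inj] at hwin
    exact hcnotpre (hwin ▸ hwpre)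
  · rintro ⟨hcs, hnopre⟩
    rw [pvWinC, hsplit, List.find?_append]
    cases hpre : List.find? (fun c' => decide (c' ∈ pvConcepts M k)) pre with
    | some w =>
      exfalso
      apply hnopre
      refine ⟨w, List.mem_of_find?_eq_some hpre, ?_⟩
      rw [pvWinC, hsplit, List.find?_append, hpre]
      rfl
    | none =>
      rw [List.find?_cons_of_pos (by simp [hcs])]
      rfl

-- main induction over the sorted concept order: A's seen-set sweep produces,
-- concept by concept, exactly B's argmin buckets
lemma phase3 (R : List (List (String × String))) (M : List (String × List String)) :
    ∀ (suf pre : List String) (seen : PySem.Set String) (g : PySem.Dict String (List (List (String × String)))),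
      bOrder R M = pre ++ suf →
      (∀ x, x ∈ seen ↔ ∃ r ∈ R, pvCode r = x ∧ ∃ w ∈ pre, pvWinC R M (pvCode r) = some w) →
      (suf.foldl (fun (st : PySem.Set String × PySem.Dict String (List (List (String × String)))) c =>
          let unique := ((aStocks R M).getD c []).filter (fun s => !(PySem.Set.contains st.1 (pvCode s)))
          (unique.foldl (fun t s => PySem.Set.add t (pvCode s)) st.1,
           if unique ≠ [] then st.2.insert c (unique.take 5) else st.2)) (seen, g)).2
        = suf.foldl (fun g c => if pvAssigned R M c ≠ [] then g.insert c ((pvAssigned R M c).take 5) else g) g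
      ∧ (∀ x, x ∈ (suf.foldl (fun (st : PySem.Set String × PySem.Dict String (List (List (String × String)))) c =>
          let unique := ((aStocks R M).getD c []).filter (fun s => !(PySem.Set.contains st.1 (pvCode s)))
          (unique.foldl (fun t s => PySem.Set.add t (pvCode s)) st.1,
           if unique ≠ [] then st.2.insert c (unique.take 5) else st.2)) (seen, g)).1
          ↔ ∃ r ∈ R, pvCode r = x ∧ ∃ w ∈ pre ++ suf, pvWinC R M (pvCode r) = some w) := by
  intro suf
  induction suf with
  | nil =>
    intro pre seen g hsplit hseen
    exact ⟨rfl, fun x => by simpa using hseen x⟩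
  | cons c suf ih =>
    intro pre seen g hsplit hseen
    have hseenmem : ∀ (r : List (String × String)), r ∈ R →
        ((PySem.Set.contains seen (pvCode r)) = true ↔ ∃ w ∈ pre, pvWinC R M (pvCode r) = some w) := by
      intro r hr
      rw [PySem.Set.contains_iff, hseen (pvCode r)]
      constructor
      · rintro ⟨r', hr', hcode, w, hwpre, hwin⟩
        exact ⟨w, hwpre, by rw [← hcode]; exact hwin⟩
      · rintro ⟨w, hwpre, hwin⟩
        exact ⟨r, hr, rfl, w, hwpre, hwin⟩
    have hunique : ((aStocks R M).getD c []).filter (fun s => !(PySem.Set.contains seen (pvCode s)))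
        = pvAssigned R M c := by
      rw [stocks_getD R M c, pvAssigned, List.filter_flatMap]
      apply List.flatMap_congr
      intro r hr
      rw [List.filter_replicate]
      have hwc := win_char R M pre suf c hsplit (pvCode r)
      by_cases hwin : pvWinC R M (pvCode r) = some c
      · have hnopre := (hwc.mp hwin).2
        have hseenF : (PySem.Set.contains seen (pvCode r)) = false := by
          rw [← Bool.not_eq_true, hseenmem r hr]
          exact hnopre
        rw [if_pos hwin, if_pos (by rw [hseenF]; rfl)]
      · rw [if_neg hwin]
        by_cases hp : (!(PySem.Set.contains seen (pvCode r))) = true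
        · rw [if_pos hp]
          have hnopre : ¬ ∃ w ∈ pre, pvWinC R M (pvCode r) = some w := by
            rw [Bool.not_eq_true'] at hp
            intro hex
            have hcontr := (hseenmem r hr).mpr hex
            rw [hp] at hcontr
            exact Bool.noConfusion hcontr
          have hcnot : c ∉ pvConcepts M (pvCode r) := fun hcc => hwin (hwc.mpr ⟨hcc, hnopre⟩)
          rw [List.count_eq_zero.mpr hcnot, List.replicate_zero]
        · rw [if_neg hp]
    rw [List.foldl_cons, List.foldl_cons]
    show ((List.foldl _ (((((aStocks R M).getD c []).filter (fun s => !(PySem.Set.contains seen (pvCode s)))).foldl (fun t s => PySem.Set.add t (pvCode s)) seen,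
        if (((aStocks R M).getD c []).filter (fun s => !(PySem.Set.contains seen (pvCode s)))) ≠ [] then g.insert c (((((aStocks R M).getD c []).filter (fun s => !(PySem.Set.contains seen (pvCode s))))).take 5) else g)) suf).2 = _) ∧ _
    rw [hunique]
    have hseen' : ∀ x, x ∈ (pvAssigned R M c).foldl (fun t s => PySem.Set.add t (pvCode s)) seen
        ↔ ∃ r ∈ R, pvCode r = x ∧ ∃ w ∈ pre ++ [c], pvWinC R M (pvCode r) = some w := by
      intro x
      rw [PySem.Set.mem_foldl_add, hseen x]
      constructor
      · rintro (⟨r, hr, hcode, w, hwpre, hwin⟩ | ⟨r, hrA, hx⟩)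
        · exact ⟨r, hr, hcode, w, by simp [hwpre], hwin⟩
        · rcases List.mem_flatMap.mp hrA with ⟨r0, hr0R, hrin⟩
          by_cases hw0 : pvWinC R M (pvCode r0) = some c
          · rw [if_pos hw0] at hrin
            have hr0 : r = r0 := List.eq_of_mem_replicate hrin
            refine ⟨r0, hr0R, ?_, c, by simp, hw0⟩
            rw [hx, hr0]
          · rw [if_neg hw0] at hrin
            exact absurd hrin (List.not_mem_nil)
      · rintro ⟨r, hr, hcode, w, hwpre', hwin⟩
        rcases List.mem_append.mp hwpre' with hwp | hwc
        · exact Or.inl ⟨r, hr, hcode, w, hwp, hwin⟩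
        · right
          have hwceq : w = c := by simpa using hwc
          subst hwceq
          refine ⟨r, ?_, hcode.symm⟩
          rw [pvAssigned]
          refine List.mem_flatMap.mpr ⟨r, hr, ?_⟩
          rw [if_pos hwin]
          refine List.mem_replicate.mpr ⟨?_, rfl⟩
          have hmem := win_mem R M (pvCode r) w hwin
          exact Nat.pos_iff_ne_zero.mp (List.count_pos_iff.mpr hmem)
    have hsplit' : bOrder R M = (pre ++ [c]) ++ suf := by
      rw [hsplit, List.append_assoc]
      rfl
    obtain ⟨h1, h2⟩ := ih (pre ++ [c])
      ((pvAssigned R M c).foldl (fun t s => PySem.Set.add t (pvCode s)) seen)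
      (if pvAssigned R M c ≠ [] then g.insert c ((pvAssigned R M c).take 5) else g)
      hsplit' hseen'
    refine ⟨h1, fun x => ?_⟩
    rw [h2 x]
    constructor
    · rintro ⟨r, hr, hcode, w, hwpre, hwin⟩
      refine ⟨r, hr, hcode, w, ?_, hwin⟩
      rw [List.append_assoc] at hwpre
      simpa using hwpre
    · rintro ⟨r, hr, hcode, w, hwpre, hwin⟩
      refine ⟨r, hr, hcode, w, ?_, hwin⟩
      rw [List.append_assoc]
      simpa using hwpre

-- ===== VERDICT (by name: the statement is the Claim_ definition above) =====
theorem group_by_concept_spec : Claim_equal_group_by_concept := by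
  intro R M _ hpre
  unfold Spec_group_by_concept group_by_concept group_by_concept_alt
  simp only [split1A, split1B]
  -- name the B-side intermediates (definitional)
  rw [countsB]
  have hord : PySem.List.sorted (bCounts R M).keys (fun c => -(bCounts R M).getD c 0) = bOrder R M := rfl
  rw [hord]
  have hrank : List.foldl (fun (d : PySem.Dict String Int) p => d.insert p.2 p.1) PySem.Dict.empty
      (PySem.List.enumerate (bOrder R M)) = bRank R M := rfl
  rw [hrank]
  have hb0 : List.foldl (fun (d : PySem.Dict String (List (List (String × String)))) c => d.insert c [])
      PySem.Dict.empty (bOrder R M) = bBuckets0 R M := rfl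
  rw [hb0]
  have hbuck : List.foldl (fun b p =>
      match PySem.List.min? (pvConcepts M (pvCode p.2)) (fun x => (bRank R M).getD x 0) with
      | some best => if p.1 == best then b.modify p.1 [] (· ++ [p.2]) else b
      | none => b) (bBuckets0 R M) (pvMems R M) = bBuckets R M := rfl
  rw [hbuck]
  have hemit : (fun (g : PySem.Dict String (List (List (String × String)))) c =>
        if (bBuckets R M).getD c [] ≠ [] then g.insert c (List.take 5 ((bBuckets R M).getD c [])) else g)
      = (fun g c => if pvAssigned R M c ≠ [] then g.insert c ((pvAssigned R M c).take 5) else g) := by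
    funext g c
    rw [buckets_getD R M c]
  rw [hemit]
  -- A side
  obtain ⟨h1, h2⟩ := phase3 R M (bOrder R M) [] PySem.Set.empty PySem.Dict.empty
    (List.nil_append _).symm (fun x => by simp [PySem.Set.empty])
  have h1' : (List.foldl (fun (st : PySem.Set String × PySem.Dict String (List (List (String × String)))) p =>
        let unique := p.2.filter (fun s => !(PySem.Set.contains st.1 (pvCode s)))
        (unique.foldl (fun t s => PySem.Set.add t (pvCode s)) st.1,
         if unique ≠ [] then st.2.insert p.1 (unique.take 5) else st.2))
        (PySem.Set.empty, PySem.Dict.empty)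
        ((bOrder R M).map (fun c => (c, (aStocks R M).getD c [])))).2
      = List.foldl (fun g c => if pvAssigned R M c ≠ [] then g.insert c ((pvAssigned R M c).take 5) else g)
          PySem.Dict.empty (bOrder R M) := by
    rw [List.foldl_map]
    exact h1
  have h2' : ∀ x, x ∈ (List.foldl (fun (st : PySem.Set String × PySem.Dict String (List (List (String × String)))) p =>
        let unique := p.2.filter (fun s => !(PySem.Set.contains st.1 (pvCode s)))
        (unique.foldl (fun t s => PySem.Set.add t (pvCode s)) st.1,
         if unique ≠ [] then st.2.insert p.1 (unique.take 5) else st.2))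
        (PySem.Set.empty, PySem.Dict.empty)
        ((bOrder R M).map (fun c => (c, (aStocks R M).getD c [])))).1
      ↔ ∃ r ∈ R, pvCode r = x ∧ ∃ w ∈ ([] : List String) ++ bOrder R M, pvWinC R M (pvCode r) = some w := by
    intro x
    rw [List.foldl_map]
    exact h2 x
  rw [sorted_items_eq R M, h1']
  have hung : List.filter (fun s => !(List.foldl (fun (st : PySem.Set String × PySem.Dict String (List (List (String × String)))) p =>
        let unique := p.2.filter (fun s => !(PySem.Set.contains st.1 (pvCode s)))
        (unique.foldl (fun t s => PySem.Set.add t (pvCode s)) st.1,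
         if unique ≠ [] then st.2.insert p.1 (unique.take 5) else st.2))
        (PySem.Set.empty, PySem.Dict.empty)
        ((bOrder R M).map (fun c => (c, (aStocks R M).getD c [])))).1.contains (pvCode s)) (pvNoc R M)
      = pvNoc R M := by
    rw [List.filter_eq_self]
    intro s hs
    rw [noc_eq_filter] at hs
    rcases List.mem_filter.mp hs with ⟨hsR, hsnil⟩
    have hsnil' : pvConcepts M (pvCode s) = [] := by simpa using hsnil
    have hnotmem : pvCode s ∉ (List.foldl (fun (st : PySem.Set String × PySem.Dict String (List (List (String × String)))) p =>
        let unique := p.2.filter (fun s => !(PySem.Set.contains st.1 (pvCode s)))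
        (unique.foldl (fun t s => PySem.Set.add t (pvCode s)) st.1,
         if unique ≠ [] then st.2.insert p.1 (unique.take 5) else st.2))
        (PySem.Set.empty, PySem.Dict.empty)
        ((bOrder R M).map (fun c => (c, (aStocks R M).getD c [])))).1 := by
      rw [h2' (pvCode s)]
      rintro ⟨r, _, hcode, w, _, hwin⟩
      rw [hcode, win_none R M (pvCode s) hsnil'] at hwin
      exact (by simp at hwin)
    simp only [Bool.not_eq_true']
    rw [← Bool.not_eq_true, PySem.Set.contains_iff]
    exact hnotmem
  rw [hung]
  by_cases hnoc : pvNoc R M ≠ [] <;> simp [hnoc]
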